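-- pv_equiv track=rewrite | github.com/Frankie-Tu/Codewars | Python/RoutePlanner.py | route_planner
-- ===== SOURCE A (Python) =====
-- from itertools import combinations
--
-- def route_planner(t, k, ls):
--     # check if we have enough towns to visit
--     if len(ls) < k:
--         return None
--     else:
--         # find all combinations
--         all_combinations = combinations(ls, k)
--         current_sum = 0
--         # check sum of all combinations
--         for combination in all_combinations:
--             if current_sum < sum(combination) <= t:
--                 current_sum = sum(combination)
--         # if it is not possible to visit the number of towns required under the maxium distance allowed
--         if current_sum == 0:
--             return None
--         else:
--             return current_sum
-- ===== SOURCE B (Python) =====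
-- def route_planner(t, k, ls):
--     # subset-sum DP: reach[j] = set of sums attainable with exactly j towns
--     if k < 0 or len(ls) < k:
--         return None
--     reach = [{0}] + [set() for _ in range(k)]
--     for x in ls:
--         reach = [reach[0]] + [reach[j] | {s + x for s in reach[j - 1]}
--                               for j in range(1, k + 1)]
--     return max((s for s in reach[k] if 0 < s <= t), default=None)
-- ===== Notes on version B (the rewrite author's own statement) =====
-- stated objective: alternative
-- what changed: B replaces A's enumeration of all C(n,k) k-combinations by a subset-sum DP maintaining, for each count j <= k, the set of sums reachable with exactly j towns, then takes the max reachable k-sum in (0, t].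
import Mathlib
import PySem

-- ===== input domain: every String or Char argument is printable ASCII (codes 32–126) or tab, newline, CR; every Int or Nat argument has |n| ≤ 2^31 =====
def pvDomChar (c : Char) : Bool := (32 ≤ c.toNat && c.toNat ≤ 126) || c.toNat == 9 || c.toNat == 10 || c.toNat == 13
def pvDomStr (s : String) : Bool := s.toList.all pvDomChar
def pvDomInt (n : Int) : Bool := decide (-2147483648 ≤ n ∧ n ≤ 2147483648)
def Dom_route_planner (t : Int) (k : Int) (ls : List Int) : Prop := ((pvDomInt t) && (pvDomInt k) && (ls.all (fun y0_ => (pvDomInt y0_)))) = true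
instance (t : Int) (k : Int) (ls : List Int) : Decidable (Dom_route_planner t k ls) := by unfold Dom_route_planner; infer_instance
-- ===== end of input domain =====

-- B replaces A's enumeration of all k-combinations by a subset-sum DP over
-- (number of towns used → set of reachable sums); objective: alternative algorithm.

-- ===== PORT A =====
-- itertools.combinations(ls, k) in Python's order
def combosA : Nat → List Int → List (List Int)
  | 0, _ => [[]]
  | _ + 1, [] => []
  | n + 1, x :: xs => ((combosA n xs).map (fun c => x :: c)) ++ combosA (n + 1) xs
termination_by n xs => xs.length

def route_planner (t : Int) (k : Int) (ls : List Int) : Option Int :=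
  if (ls.length : Int) < k then none
  else
    let cs := (combosA k.toNat ls).foldl
      (fun c comb => if c < comb.sum ∧ comb.sum ≤ t then comb.sum else c) 0
    if cs = 0 then none else some cs

-- ===== PORT B =====
-- [reach[j] | {s + x for s in reach[j-1]} for j in range(1, k+1)] : prev is reach[j-1]
def stepTail (x : Int) (prev : PySem.Set Int) : List (PySem.Set Int) → List (PySem.Set Int)
  | [] => []
  | r :: rs => PySem.Set.union r (prev.map (fun s => s + x)) :: stepTail x r rs

-- reach = [reach[0]] + …
def stepRow (x : Int) : List (PySem.Set Int) → List (PySem.Set Int)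
  | [] => []
  | r0 :: rest => r0 :: stepTail x r0 rest

def route_planner_alt (t : Int) (k : Int) (ls : List Int) : Option Int :=
  if k < 0 ∨ (ls.length : Int) < k then none
  else
    let reach := ls.foldl (fun r x => stepRow x r)
      (PySem.Set.ofList [0] :: List.replicate k.toNat PySem.Set.empty)
    PySem.List.max?
      ((reach.getD k.toNat PySem.Set.empty).filter (fun s => decide (0 < s ∧ s ≤ t)))
      (fun s => s)

-- ===== PRECONDITION & SPEC =====
-- Pre_ excludes k < 0, where A's combinations(ls, k) raises ValueError.
def Pre_route_planner (t : Int) (k : Int) (ls : List Int) : Prop := 0 ≤ k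
instance (t : Int) (k : Int) (ls : List Int) : Decidable (Pre_route_planner t k ls) := by unfold Pre_route_planner; infer_instance
def pvWitness_route_planner : Int × Int × List Int := (10, 2, [1, 2, 3])

def Spec_route_planner (t : Int) (k : Int) (ls : List Int) (out : Option Int) : Prop := out = route_planner_alt t k ls
instance (t : Int) (k : Int) (ls : List Int) (out : Option Int) : Decidable (Spec_route_planner t k ls out) := by unfold Spec_route_planner; infer_instance

-- ===== CLAIM (what is proved, stated in full; the proofs are below) =====
def Claim_equal_route_planner : Prop := ∀ (t : Int) (k : Int) (ls : List Int), Dom_route_planner t k ls → Pre_route_planner t k ls → Spec_route_planner t k ls (route_planner t k ls)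

-- ===== LEMMAS AND PROOFS =====

theorem length_stepTail (x : Int) (prev : PySem.Set Int) (rs : List (PySem.Set Int)) :
    (stepTail x prev rs).length = rs.length := by
  induction rs generalizing prev with
  | nil => rfl
  | cons r rs ih => simp [stepTail, ih]

theorem length_stepRow (x : Int) (reach : List (PySem.Set Int)) :
    (stepRow x reach).length = reach.length := by
  cases reach with
  | nil => rfl
  | cons r0 rest => simp [stepRow, length_stepTail]

theorem mem_stepTail (x : Int) (prev : PySem.Set Int) (rs : List (PySem.Set Int))
    (m : Nat) (v : Int) :
    v ∈ (stepTail x prev rs).getD m PySem.Set.empty ↔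
      v ∈ rs.getD m PySem.Set.empty ∨
        (m < rs.length ∧ ∃ w ∈ (prev :: rs).getD m PySem.Set.empty, v = w + x) := by
  induction rs generalizing prev m with
  | nil => simp [stepTail, PySem.Set.empty]
  | cons r rs ih =>
    cases m with
    | zero => simp [stepTail, PySem.Set.mem_union, eq_comm]
    | succ m => simpa [stepTail] using ih r m

theorem mem_stepRow (x : Int) (reach : List (PySem.Set Int)) (m : Nat) (v : Int)
    (hm : m < reach.length) :
    v ∈ (stepRow x reach).getD m PySem.Set.empty ↔
      v ∈ reach.getD m PySem.Set.empty ∨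
        (1 ≤ m ∧ ∃ w ∈ reach.getD (m - 1) PySem.Set.empty, v = w + x) := by
  cases reach with
  | nil => simp at hm
  | cons r0 rest =>
    cases m with
    | zero => simp [stepRow]
    | succ m =>
      have hm' : m < rest.length := by simp at hm; omega
      simp only [stepRow, List.getD_cons_succ, Nat.add_sub_cancel]
      rw [mem_stepTail]
      simp [hm']

-- main DP invariant: membership in the folded row
theorem mem_foldl_step (ls : List Int) (reach : List (PySem.Set Int)) (j : Nat)
    (hj : j < reach.length) (s : Int) :
    s ∈ (ls.foldl (fun r x => stepRow x r) reach).getD j PySem.Set.empty ↔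
      ∃ i, i ≤ j ∧ ∃ u ∈ reach.getD (j - i) PySem.Set.empty,
        ∃ c ∈ combosA i ls, s = u + c.sum := by
  induction ls generalizing reach with
  | nil =>
    simp only [List.foldl_nil]
    constructor
    · intro h
      exact ⟨0, Nat.zero_le _, s, by simpa using h, [], by simp [combosA], by simp⟩
    · rintro ⟨i, hi, u, hu, c, hc, rfl⟩
      cases i with
      | zero =>
        simp only [combosA, List.mem_singleton] at hc
        subst hc; simpa using hu
      | succ i => simp [combosA] at hc
  | cons x rest ih =>
    simp only [List.foldl_cons]
    rw [ih (stepRow x reach) (by rwa [length_stepRow])]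
    constructor
    · rintro ⟨i, hi, u, hu, c, hc, rfl⟩
      rw [mem_stepRow x reach (j - i) u (by omega)] at hu
      rcases hu with hu | ⟨h1, w, hw, rfl⟩
      · refine ⟨i, hi, u, hu, c, ?_, rfl⟩
          -- c itself is a combination of x :: rest not using x
        cases i with
        | zero => simpa [combosA] using hc
        | succ i =>
          simp only [combosA, List.mem_append]
          exact Or.inr hc
      · refine ⟨i + 1, by omega, w, ?_, x :: c, ?_, by rw [List.sum_cons]; ring⟩
        · have : j - i - 1 = j - (i + 1) := by omega
          rwa [this] at hw
        · simp only [combosA, List.mem_append, List.mem_map]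
          exact Or.inl ⟨c, hc, rfl⟩
    · rintro ⟨i, hi, u, hu, c, hc, rfl⟩
      cases i with
      | zero =>
        simp only [combosA, List.mem_singleton] at hc
        subst hc
        refine ⟨0, Nat.zero_le _, u, ?_, [], by simp [combosA], by simp⟩
        simp only [Nat.sub_zero]
        rw [mem_stepRow x reach j u hj]
        exact Or.inl (by simpa using hu)
      | succ i =>
        simp only [combosA, List.mem_append, List.mem_map] at hc
        rcases hc with ⟨c', hc', rfl⟩ | hc
        · refine ⟨i, by omega, u + x, ?_, c', hc', by rw [List.sum_cons]; ring⟩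
          rw [mem_stepRow x reach (j - i) (u + x) (by omega)]
          refine Or.inr ⟨by omega, u, ?_, rfl⟩
          have : j - i - 1 = j - (i + 1) := by omega
          rwa [this]
        · refine ⟨i + 1, hi, u, ?_, c, hc, rfl⟩
          rw [mem_stepRow x reach (j - (i + 1)) u (by omega)]
          exact Or.inl hu

-- membership in the final row = sums of k-combinations
theorem mem_final_row (K : Nat) (ls : List Int) (s : Int) :
    s ∈ ((ls.foldl (fun r x => stepRow x r)
        (PySem.Set.ofList [0] :: List.replicate K PySem.Set.empty)).getD K
          PySem.Set.empty) ↔ ∃ c ∈ combosA K ls, s = c.sum := by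
  rw [mem_foldl_step ls _ K (by simp)]
  constructor
  · rintro ⟨i, hi, u, hu, c, hc, rfl⟩
    rcases Nat.lt_or_ge i K with hlt | hge
    · exfalso
      have h1 : 1 ≤ K - i := by omega
      rcases Nat.exists_eq_add_of_le h1 with ⟨m, hm⟩
      have hm' : K - i = m + 1 := by omega
      rw [hm'] at hu
      simp only [List.getD_cons_succ] at hu
      have hrep : (List.replicate K (PySem.Set.empty (α := Int))).getD m PySem.Set.empty
          = PySem.Set.empty := by
        rcases Nat.lt_or_ge m K with h | h
        · simp [List.getD_eq_getElem?_getD, List.getElem?_replicate, h]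
        · rw [List.getD_eq_getElem?_getD, List.getElem?_eq_none (by simpa using h)]; rfl
      rw [hrep] at hu
      simp [PySem.Set.empty] at hu
    · have : i = K := by omega
      subst this
      simp only [Nat.sub_self, List.getD_cons_zero] at hu
      have : u = 0 := by simpa [PySem.Set.ofList] using hu
      exact ⟨c, hc, by simp [this]⟩
  · rintro ⟨c, hc, rfl⟩
    exact ⟨K, le_refl _, 0, by simp [PySem.Set.ofList], c, hc, by simp⟩

-- A's running-max fold, characterised
def foldA (t : Int) (L : List Int) (a : Int) : Int :=
  L.foldl (fun c v => if c < v ∧ v ≤ t then v else c) a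

theorem foldA_cons (t v a : Int) (L : List Int) :
    foldA t (v :: L) a = foldA t L (if a < v ∧ v ≤ t then v else a) := rfl

theorem le_foldA (t : Int) (L : List Int) (a : Int) : a ≤ foldA t L a := by
  induction L generalizing a with
  | nil => simp [foldA]
  | cons v L ih =>
    rw [foldA_cons]
    split_ifs with h
    · exact le_trans (le_of_lt h.1) (ih v)
    · exact ih a

theorem foldA_mem (t : Int) (L : List Int) (a : Int) :
    foldA t L a = a ∨ (foldA t L a ∈ L ∧ foldA t L a ≤ t) := by
  induction L generalizing a with
  | nil => simp [foldA]
  | cons v L ih =>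
    rw [foldA_cons]
    split_ifs with h
    · rcases ih v with h' | h'
      · exact Or.inr ⟨by rw [h']; exact List.mem_cons_self .., by rw [h']; exact h.2⟩
      · exact Or.inr ⟨List.mem_cons_of_mem _ h'.1, h'.2⟩
    · rcases ih a with h' | h'
      · exact Or.inl h'
      · exact Or.inr ⟨List.mem_cons_of_mem _ h'.1, h'.2⟩

theorem foldA_ub (t : Int) (L : List Int) (a : Int) :
    ∀ v ∈ L, v ≤ t → v ≤ foldA t L a := by
  induction L generalizing a with
  | nil => simp
  | cons w L ih =>
    intro v hv hvt
    rw [foldA_cons]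
    rcases List.mem_cons.mp hv with rfl | hv
    · split_ifs with h
      · exact le_foldA t L v
      · have : v ≤ a := by
          rcases not_and_or.mp h with h | h
          · omega
          · omega
        exact le_trans this (le_foldA t L a)
    · split_ifs with h
      · exact ih w v hv hvt
      · exact ih a v hv hvt

theorem route_planner_eq (t k : Int) (ls : List Int) (hk : 0 ≤ k) :
    route_planner t k ls = route_planner_alt t k ls := by
  by_cases hlen : (ls.length : Int) < k
  · simp [route_planner, route_planner_alt, hlen]
  · have hguard : ¬ (k < 0 ∨ (ls.length : Int) < k) := by omega
    set K := k.toNat with hK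
    set L := (combosA K ls).map List.sum with hL
    set S := ((ls.foldl (fun r x => stepRow x r)
        (PySem.Set.ofList [0] :: List.replicate K PySem.Set.empty)).getD K
          PySem.Set.empty) with hS
    set F := S.filter (fun s => decide (0 < s ∧ s ≤ t)) with hF
    set r := foldA t L 0 with hr
    have hcs : (combosA K ls).foldl
        (fun c comb => if c < comb.sum ∧ comb.sum ≤ t then comb.sum else c) 0 = r := by
      rw [hr, hL, foldA, List.foldl_map]
    have hgoal : route_planner t k ls = if r = 0 then none else some r := by
      rw [route_planner, if_neg hlen, ← hK, hcs]
    have hgoal' : route_planner_alt t k ls = PySem.List.max? F (fun s => s) := by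
      rw [route_planner_alt, if_neg hguard]
    rw [hgoal, hgoal']
    have hmemS : ∀ s : Int, s ∈ S ↔ s ∈ L := by
      intro s
      rw [hS, mem_final_row K ls s, hL]
      simp only [List.mem_map]
      constructor
      · rintro ⟨c, hc, rfl⟩; exact ⟨c, hc, rfl⟩
      · rintro ⟨c, hc, rfl⟩; exact ⟨c, hc, rfl⟩
    have hr0 : 0 ≤ r := le_foldA t L 0
    have hmemF : ∀ s : Int, s ∈ F ↔ s ∈ L ∧ 0 < s ∧ s ≤ t := by
      intro s
      rw [hF]
      simp only [List.mem_filter, decide_eq_true_eq]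
      rw [hmemS]
    by_cases hz : r = 0
    · rw [if_pos hz]
      have hFnil : F = [] := by
        rw [List.eq_nil_iff_forall_not_mem]
        intro s hs
        rw [hmemF] at hs
        have := foldA_ub t L 0 s hs.1 hs.2.2
        omega
      rw [hFnil]
      rfl
    · rw [if_neg hz]
      have hrmem : r ∈ L ∧ r ≤ t := by
        rcases foldA_mem t L 0 with h | h
        · exact absurd h hz
        · exact h
      have hrF : r ∈ F := by
        rw [hmemF]; exact ⟨hrmem.1, by omega, hrmem.2⟩
      rcases hm : PySem.List.max? F (fun s => s) with _ | m
      · rw [PySem.List.max?_eq_none_iff] at hm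
        rw [hm] at hrF
        simp at hrF
      · have hmF : m ∈ F := PySem.List.max?_mem hm
        have hub : r ≤ m := PySem.List.max?_isMax hm r hrF
        have hmL : m ∈ L ∧ 0 < m ∧ m ≤ t := (hmemF m).mp hmF
        have hle : m ≤ r := foldA_ub t L 0 m hmL.1 hmL.2.2
        rw [le_antisymm hle hub]

-- ===== VERDICT (by name: the statement is the Claim_ definition above) =====
theorem route_planner_spec : Claim_equal_route_planner := by
  intro t k ls _ hk
  unfold Spec_route_planner
  exact route_planner_eq t k ls hk
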